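-- pv_equiv track=rewrite | github.com/AlexandrePoisson/ScrabbleML | src/scrabble/augment_rare_letters.py | _select_rare_letters
-- ===== SOURCE A (Python) =====
-- from typing import Dict, Iterable, List, Optional, Sequence, Tuple
--
-- def _select_rare_letters(letter_counts: Dict[str, int], bottom_n: int) -> List[str]:
-- 	if bottom_n <= 0:
-- 		return []
-- 	items = sorted(letter_counts.items(), key=lambda kv: (kv[1], kv[0]))
-- 	if not items:
-- 		return []
-- 	cutoff_index = min(bottom_n - 1, len(items) - 1)
-- 	cutoff_count = items[cutoff_index][1]
-- 	# Include ties at cutoff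
-- 	return [k for k, v in items if v <= cutoff_count]
-- ===== SOURCE B (Python) =====
-- def _select_rare_letters(letter_counts, bottom_n):
-- 	if bottom_n <= 0 or not letter_counts:
-- 		return []
-- 	return _peel(list(letter_counts.items()), bottom_n)
--
-- def _peel(items, need):
-- 	if need <= 0 or not items:
-- 		return []
-- 	m = min(v for _, v in items)
-- 	grp = sorted(k for k, v in items if v == m)
-- 	rest = [(k, v) for k, v in items if v != m]
-- 	return grp + _peel(rest, need - len(grp))
-- ===== Notes on version B (the rewrite author's own statement) =====
-- stated objective: alternative
-- what changed: A sorts all items lexicographically once, reads a cutoff count by index and filters the sorted list; B never sorts the whole list: it recursively peels off the minimum-count group (min + filter each round, sorting only that group's letters) and decrements the quota until it is met.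
import Mathlib
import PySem

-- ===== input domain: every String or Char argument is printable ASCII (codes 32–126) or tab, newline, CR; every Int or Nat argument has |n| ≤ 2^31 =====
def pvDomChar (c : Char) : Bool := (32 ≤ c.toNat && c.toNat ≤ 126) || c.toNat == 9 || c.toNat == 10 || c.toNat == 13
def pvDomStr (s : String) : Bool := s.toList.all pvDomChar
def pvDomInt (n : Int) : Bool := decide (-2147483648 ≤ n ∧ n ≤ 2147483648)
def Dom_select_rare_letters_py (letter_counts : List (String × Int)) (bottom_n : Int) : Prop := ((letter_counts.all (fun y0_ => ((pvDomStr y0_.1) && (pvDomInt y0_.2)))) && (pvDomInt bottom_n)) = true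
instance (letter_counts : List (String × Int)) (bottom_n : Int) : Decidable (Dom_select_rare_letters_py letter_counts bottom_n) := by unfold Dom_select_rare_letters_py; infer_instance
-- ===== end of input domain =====

-- B replaces A's sort-whole-list/index-cutoff/filter with a recursion that peels off the
-- minimum-count group each round and decrements the quota (objective: alternative).

-- ===== PORT A =====
-- items[cutoff_index] is always in range here (bottom_n ≥ 1 and items ≠ []), so pyGetD with a
-- dummy default is exact.
def select_rare_letters_py (letter_counts : List (String × Int)) (bottom_n : Int) : List String :=
  if bottom_n ≤ 0 then []
  else
    let items := PySem.List.sorted2 letter_counts (fun kv => kv.2) (fun kv => kv.1)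
    if items = [] then []
    else
      let cutoff_index := min (bottom_n - 1) ((items.length : Int) - 1)
      let cutoff_count := (PySem.List.pyGetD items cutoff_index ("", 0)).2
      (items.filter (fun kv => decide (kv.2 ≤ cutoff_count))).map (fun kv => kv.1)

-- ===== PORT B =====
-- termination helper: the min-count group is nonempty, so `rest` is strictly shorter
theorem pvPeel_rest_lt (items : List (String × Int))
    (m : Int) (hm : PySem.List.min? (items.map (fun kv => kv.2)) (fun v => v) = some m) :
    (items.filter (fun kv => !(kv.2 == m))).length < items.length := by
  rw [List.length_filter_lt_length_iff_exists]
  have hmem := PySem.List.min?_mem hm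
  rcases List.mem_map.1 hmem with ⟨kv, hkv, hv⟩
  exact ⟨kv, hkv, by simp [hv]⟩

-- `min(v for _, v in items)` is total in this branch (items ≠ []), so `.getD 0` is exact.
def pvPeel (items : List (String × Int)) (need : Int) : List String :=
  if h : need ≤ 0 ∨ items = [] then []
  else
    let m := (PySem.List.min? (items.map (fun kv => kv.2)) (fun v => v)).getD 0
    let grp := PySem.List.sorted ((items.filter (fun kv => kv.2 == m)).map (fun kv => kv.1)) (fun k => k)
    let rest := items.filter (fun kv => !(kv.2 == m))
    grp ++ pvPeel rest (need - (grp.length : Int))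
termination_by items.length
decreasing_by
  have hne : ¬(items = []) := fun he => h (Or.inr he)
  have hne2 : ¬(PySem.List.min? (items.map (fun kv : String × Int => kv.2)) (fun v => v) = none) := by
    rw [PySem.List.min?_eq_none_iff, List.map_eq_nil_iff]
    exact hne
  rcases Option.ne_none_iff_exists'.1 hne2 with ⟨m', hm'⟩
  have hlt := pvPeel_rest_lt items m' hm'
  simp only [List.map_attach_eq_pmap, List.pmap_eq_map]
  simp only [show (List.map Prod.snd items) = items.map (fun kv => kv.2) from rfl, hm',
    Option.getD_some]
  have heq : (List.filter (fun x : {x // x ∈ items} => !(x.1).2 == m') items.attach).unattach.length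
      = (List.filter (fun kv => !kv.2 == m') items).length := by
    rw [List.filter_attach items (fun kv => !kv.2 == m')]
    simp
  exact heq.trans_lt hlt

def select_rare_letters_py_alt (letter_counts : List (String × Int)) (bottom_n : Int) : List String :=
  if bottom_n ≤ 0 || letter_counts.isEmpty then []
  else pvPeel letter_counts bottom_n

-- ===== PRECONDITION & SPEC =====
-- Pre_ excludes association lists with duplicate letters: those do not denote a Python dict
-- (dict(...) collapses duplicates), so the ports' behaviour there represents no run of the Python.
def Pre_select_rare_letters_py (letter_counts : List (String × Int)) (_bottom_n : Int) : Prop :=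
  (letter_counts.map Prod.fst).Nodup
instance (letter_counts : List (String × Int)) (bottom_n : Int) : Decidable (Pre_select_rare_letters_py letter_counts bottom_n) := by unfold Pre_select_rare_letters_py; infer_instance

def pvWitness_select_rare_letters_py : (List (String × Int)) × Int := ([("a", 3), ("b", 1), ("c", 1)], 1)

def Spec_select_rare_letters_py (letter_counts : List (String × Int)) (bottom_n : Int) (out : List String) : Prop := out = select_rare_letters_py_alt letter_counts bottom_n
instance (letter_counts : List (String × Int)) (bottom_n : Int) (out : List String) : Decidable (Spec_select_rare_letters_py letter_counts bottom_n out) := by unfold Spec_select_rare_letters_py; infer_instance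

-- ===== CLAIM (what is proved, stated in full; the proofs are below) =====
def Claim_equal_select_rare_letters_py : Prop := ∀ (letter_counts : List (String × Int)) (bottom_n : Int), Dom_select_rare_letters_py letter_counts bottom_n → Pre_select_rare_letters_py letter_counts bottom_n → Spec_select_rare_letters_py letter_counts bottom_n (select_rare_letters_py letter_counts bottom_n)

-- ===== LEMMAS AND PROOFS =====

-- sorted2 is sorted under the lexicographic key.
theorem pv_sorted2_eq_sorted_lex {α κ₁ κ₂ : Type} [LinearOrder κ₁] [LinearOrder κ₂]
    (xs : List α) (k1 : α → κ₁) (k2 : α → κ₂) :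
    PySem.List.sorted2 xs k1 k2 false
      = PySem.List.sorted xs (fun x => toLex (k1 x, k2 x)) false := by
  have h : (fun a b => decide (k1 a < k1 b) || (!decide (k1 b < k1 a) && decide (k2 a < k2 b)))
      = (fun a b : α => decide (toLex (k1 a, k2 a) < toLex (k1 b, k2 b))) := by
    funext a b
    rcases lt_trichotomy (k1 a) (k1 b) with h1 | h1 | h1
    · simp [h1, Prod.Lex.lt_iff]
    · simp [h1, Prod.Lex.lt_iff]
    · simp [h1, Prod.Lex.lt_iff, not_lt_of_gt h1, ne_of_gt h1]
  simp only [PySem.List.sorted2, PySem.List.sorted, if_neg (by decide : ¬ (false = true))]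
  rw [h]

-- a list in which every element satisfying p precedes every element not satisfying p
-- splits as filter p ++ filter !p
theorem pv_filter_split {α : Type} (p : α → Bool) :
    ∀ (L : List α), L.Pairwise (fun a b => p b = true → p a = true) →
      L = L.filter p ++ L.filter (fun x => !p x) := by
  intro L hL
  induction L with
  | nil => simp
  | cons a t ih =>
    rcases List.pairwise_cons.1 hL with ⟨h1, h2⟩
    by_cases hpa : p a = true
    · simp only [List.filter_cons, hpa, Bool.not_true, if_true]
      simpa using ih h2
    · have hall : ∀ b ∈ t, ¬ p b = true := fun b hb hpb => hpa (h1 b hb hpb)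
      have hnil : t.filter p = [] := List.filter_eq_nil_iff.2 hall
      have hsame : t.filter (fun x => !p x) = t :=
        List.filter_eq_self.2 (fun b hb => by simp [hall b hb])
      simp [hpa, hnil, hsame]

theorem pv_pyGetD_mem {α : Type} (l : List α) (i : Int) (d : α)
    (h0 : 0 ≤ i) (h : i < (l.length : Int)) : PySem.List.pyGetD l i d ∈ l := by
  rw [PySem.List.pyGetD_eq_getElem l d h0 h]
  exact List.getElem_mem _

theorem pv_pyGetD_append_left {α : Type} (l₁ l₂ : List α) (i : Int) (d : α)
    (h0 : 0 ≤ i) (h : i < (l₁.length : Int)) :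
    PySem.List.pyGetD (l₁ ++ l₂) i d = PySem.List.pyGetD l₁ i d := by
  rw [PySem.List.pyGetD_eq_getElem _ d h0 (by simp; omega),
    PySem.List.pyGetD_eq_getElem l₁ d h0 h]
  exact List.getElem_append_left (by omega)

theorem pv_pyGetD_append_right {α : Type} (l₁ l₂ : List α) (i : Int) (d : α)
    (h0 : (l₁.length : Int) ≤ i) (h : i < (l₁.length : Int) + (l₂.length : Int)) :
    PySem.List.pyGetD (l₁ ++ l₂) i d = PySem.List.pyGetD l₂ (i - (l₁.length : Int)) d := by
  rw [PySem.List.pyGetD_eq_getElem _ d (by omega) (by simp; omega),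
    PySem.List.pyGetD_eq_getElem l₂ d (by omega) (by omega)]
  rw [List.getElem_append_right (by omega)]
  congr 1
  omega

theorem pv_main : ∀ (N : ℕ), ∀ (lc : List (String × Int)), lc.length ≤ N →
    (lc.map Prod.fst).Nodup → ∀ n : ℤ,
    select_rare_letters_py lc n = pvPeel lc n := by
  intro N
  induction N with
  | zero =>
    intro lc hl _ n
    have : lc = [] := List.length_eq_zero_iff.1 (Nat.le_zero.1 hl)
    subst this
    rw [pvPeel]
    simp [select_rare_letters_py, PySem.List.sorted2]
  | succ N ih =>
    intro lc hl hnd n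
    by_cases hn : n ≤ 0
    · rw [pvPeel]
      simp [select_rare_letters_py, hn]
    · by_cases hlc : lc = []
      · subst hlc
        rw [pvPeel]
        simp [select_rare_letters_py, PySem.List.sorted2]
      · -- main case: lc ≠ [], 1 ≤ n
        have hmapne : lc.map (fun kv : String × Int => kv.2) ≠ [] := by
          simpa [List.map_eq_nil_iff] using hlc
        have hne2 : PySem.List.min? (lc.map (fun kv : String × Int => kv.2)) (fun v => v) ≠ none :=
          fun h => hmapne ((PySem.List.min?_eq_none_iff _ _).1 h)
        rcases Option.ne_none_iff_exists'.1 hne2 with ⟨m, hm⟩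
        have hmin : ∀ kv ∈ lc, m ≤ kv.2 := by
          intro kv hkv
          simpa using PySem.List.min?_isMin hm kv.2 (List.mem_map.2 ⟨kv, hkv, rfl⟩)
        set keyA : String × Int → Lex (Int × String) := fun kv => toLex (kv.2, kv.1) with hkeyA
        set S := PySem.List.sorted lc keyA false with hSdef
        have hperm : S.Perm lc := PySem.List.sorted_perm lc keyA false
        have hSne : S ≠ [] := fun h => hlc (List.Perm.eq_nil (h ▸ hperm).symm)
        have hkeyinj : Function.Injective keyA := by
          intro a b h
          have h' := toLex.injective h
          simp only [Prod.mk.injEq] at h'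
          exact Prod.ext h'.2 h'.1
        have hndS : S.Nodup := hperm.nodup_iff.2 (List.Nodup.of_map Prod.fst hnd)
        have hple : S.Pairwise (fun a b => keyA a ≤ keyA b) := PySem.List.sorted_pairwise lc keyA
        have hplt : S.Pairwise (fun a b => keyA a < keyA b) := by
          refine List.Pairwise.imp_of_mem ?_ (hple.and hndS)
          intro a b _ _ h
          exact lt_of_le_of_ne h.1 (fun he => h.2 (hkeyinj he))
        set p : String × Int → Bool := fun kv => kv.2 == m with hp
        have hsplitprem : S.Pairwise (fun a b => p b = true → p a = true) := by
          refine List.Pairwise.imp_of_mem ?_ hple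
          intro a b ha _hb hab hpb
          have hbm : b.2 = m := by simpa [hp] using hpb
          have hfst : a.2 ≤ b.2 := by
            rcases Prod.Lex.le_iff.1 hab with h | h
            · exact le_of_lt h
            · exact le_of_eq h.1
          have hma : m ≤ a.2 := hmin a (hperm.mem_iff.1 ha)
          simp only [hp, beq_iff_eq]
          omega
        set Sm := S.filter p with hSm
        set Sr := S.filter (fun x => !p x) with hSr
        have hsplit : S = Sm ++ Sr := pv_filter_split p S hsplitprem
        have hSmmem : ∀ x ∈ Sm, x.2 = m := fun x hx => by
          simpa [hp] using List.of_mem_filter hx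
        have hSrmem : ∀ x ∈ Sr, m < x.2 := by
          intro x hx
          have h1 := List.of_mem_filter hx
          have h2 : m ≤ x.2 := hmin x (hperm.mem_iff.1 (List.mem_of_mem_filter hx))
          simp only [hp, Bool.not_eq_eq_eq_not, Bool.not_true, beq_eq_false_iff_ne, ne_eq] at h1
          omega
        have hSmne : Sm ≠ [] := by
          rcases List.mem_map.1 (PySem.List.min?_mem hm) with ⟨kv, hkv, hv⟩
          have : kv ∈ Sm := List.mem_filter.2 ⟨hperm.mem_iff.2 hkv, by simp [hp, hv]⟩
          exact List.ne_nil_of_mem this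
        have hgge : 1 ≤ Sm.length := by
          cases hSm' : Sm with
          | nil => exact absurd hSm' hSmne
          | cons a t => simp
        have hgetDm : (PySem.List.min? (lc.map (fun kv : String × Int => kv.2)) (fun v => v)).getD 0 = m := by
          rw [hm]; rfl
        set grp := PySem.List.sorted ((lc.filter p).map (fun kv => kv.1)) (fun k => k) with hgrpdef
        have hgrpeq : grp = Sm.map (fun kv => kv.1) := by
          refine PySem.List.sorted_eq_of_perm_of_pairwise_lt _ _ _ ((hperm.filter p).map _) ?_
          have h1' : Sm.Pairwise (fun a b => a.1 < b.1) := by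
            refine List.Pairwise.imp_of_mem ?_ (hplt.filter p)
            intro a b ha hb hab
            have ham := hSmmem a ha
            have hbm := hSmmem b hb
            have hab' := Prod.Lex.lt_iff.1 hab
            simp only [hkeyA, ofLex_toLex] at hab'
            rcases hab' with h | h
            · rw [ham, hbm] at h
              exact absurd h (lt_irrefl m)
            · exact h.2
          exact List.Pairwise.map _ (fun a b h => h) h1'
        have hglen : grp.length = Sm.length := by rw [hgrpeq, List.length_map]
        have hrestlt : (lc.filter (fun kv => !p kv)).length < lc.length :=
          pvPeel_rest_lt lc m hm
        have hndrest : ((lc.filter (fun kv => !p kv)).map Prod.fst).Nodup :=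
          List.Nodup.sublist (List.Sublist.map Prod.fst List.filter_sublist) hnd
        have hpermrest : Sr.Perm (lc.filter (fun kv => !p kv)) := hperm.filter _
        have hsortedrest : PySem.List.sorted (lc.filter (fun kv => !p kv)) keyA false = Sr :=
          PySem.List.sorted_eq_of_perm_of_pairwise_lt _ _ _ hpermrest (hplt.filter _)
        have hBstep : pvPeel lc n = grp ++ pvPeel (lc.filter (fun kv => !p kv)) (n - (grp.length : Int)) := by
          rw [pvPeel, dif_neg (not_or.2 ⟨hn, hlc⟩)]
          simp only [hgetDm]
          rfl
        have hlen1 : 1 ≤ S.length := by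
          cases hS' : S with
          | nil => exact absurd hS' hSne
          | cons a t => simp
        have hlenS : S.length = Sm.length + Sr.length := by rw [hsplit, List.length_append]
        set I := min (n - 1) ((S.length : Int) - 1) with hIdef
        have hi0 : 0 ≤ I := by omega
        have hiL : I < (S.length : Int) := by omega
        have hApre : select_rare_letters_py lc n
            = (S.filter (fun kv => decide (kv.2 ≤ (PySem.List.pyGetD S (I) ("", 0)).2))).map (fun kv => kv.1) := by
          simp only [select_rare_letters_py, if_neg hn]
          rw [pv_sorted2_eq_sorted_lex]
          rw [show (fun x : String × Int => toLex (x.2, x.1)) = keyA from rfl, ← hSdef, if_neg hSne]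
        by_cases hcm : n ≤ (Sm.length : Int) ∨ Sr = []
        · -- cutoff is the minimum count m, A returns exactly the m-group
          have hidx : I < (Sm.length : Int) := by
            rcases hcm with h | h
            · omega
            · have : Sr.length = 0 := by rw [h]; rfl
              omega
          have hmemSm : PySem.List.pyGetD S (I) ("", 0) ∈ Sm := by
            have h1 : PySem.List.pyGetD S (I) ("", 0)
                = PySem.List.pyGetD Sm (I) ("", 0) := by
              conv_lhs => rw [hsplit]
              exact pv_pyGetD_append_left Sm Sr _ _ hi0 hidx
            rw [h1]
            exact pv_pyGetD_mem Sm _ _ hi0 hidx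
          have hc : (PySem.List.pyGetD S (I) ("", 0)).2 = m :=
            hSmmem _ hmemSm
          have hfS : S.filter (fun kv => decide (kv.2 ≤ m)) = Sm := by
            conv_lhs => rw [hsplit]
            rw [List.filter_append,
              List.filter_eq_self.2 (fun x hx => by simp [hSmmem x hx]),
              List.filter_eq_nil_iff.2 (fun x hx => by
                have := hSrmem x hx
                simp only [decide_eq_true_eq]
                omega),
              List.append_nil]
          have hstop : pvPeel (lc.filter (fun kv => !p kv)) (n - (grp.length : Int)) = [] := by
            rw [pvPeel]
            rcases hcm with h | h
            · exact dif_pos (Or.inl (by omega))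
            · exact dif_pos (Or.inr (List.Perm.eq_nil (h ▸ hpermrest).symm))
          rw [hApre, hc, hfS, hBstep, hstop, List.append_nil, hgrpeq]
        · push_neg at hcm
          obtain ⟨hgn, hSrne⟩ := hcm
          have hSrlen : 1 ≤ Sr.length := by
            cases hS' : Sr with
            | nil => exact absurd hS' hSrne
            | cons a t => simp
          -- A's cutoff element lives in Sr
          have hi0' : 0 ≤ min (n - (Sm.length : Int) - 1) ((Sr.length : Int) - 1) := by omega
          have hiL' : min (n - (Sm.length : Int) - 1) ((Sr.length : Int) - 1) < (Sr.length : Int) := by omega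
          have hge : (Sm.length : Int) ≤ I := by omega
          have hc' : PySem.List.pyGetD S (I) ("", 0)
              = PySem.List.pyGetD Sr (min (n - (Sm.length : Int) - 1) ((Sr.length : Int) - 1)) ("", 0) := by
            conv_lhs => rw [hsplit]
            rw [pv_pyGetD_append_right Sm Sr _ _ hge (by omega)]
            congr 1
            omega
          set c := (PySem.List.pyGetD Sr (min (n - (Sm.length : Int) - 1) ((Sr.length : Int) - 1)) ("", 0)).2 with hcdef
          have hmemSr : PySem.List.pyGetD Sr (min (n - (Sm.length : Int) - 1) ((Sr.length : Int) - 1)) ("", 0) ∈ Sr :=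
            pv_pyGetD_mem Sr _ _ hi0' hiL'
          have hmc : m < c := hSrmem _ hmemSr
          have hfS : S.filter (fun kv => decide (kv.2 ≤ c)) = Sm ++ Sr.filter (fun kv => decide (kv.2 ≤ c)) := by
            conv_lhs => rw [hsplit]
            rw [List.filter_append,
              List.filter_eq_self.2 (fun x hx => by
                have := hSmmem x hx
                simp only [decide_eq_true_eq]
                omega)]
          -- unfold A on the rest with the reduced quota
          have hrestne : lc.filter (fun kv => !p kv) ≠ [] :=
            fun h => hSrne (List.Perm.eq_nil (h ▸ hpermrest))
          have hArest : select_rare_letters_py (lc.filter (fun kv => !p kv)) (n - (grp.length : Int))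
              = (Sr.filter (fun kv => decide (kv.2 ≤ c))).map (fun kv => kv.1) := by
            have hn' : ¬ (n - (grp.length : Int) ≤ 0) := by omega
            simp only [select_rare_letters_py, if_neg hn']
            rw [pv_sorted2_eq_sorted_lex,
              show (fun x : String × Int => toLex (x.2, x.1)) = keyA from rfl,
              hsortedrest, if_neg hSrne, hcdef, hglen]
          rw [hApre, hc', hfS, List.map_append, hBstep,
            ← ih (lc.filter (fun kv => !p kv)) (by omega) hndrest (n - (grp.length : Int)),
            hArest, hgrpeq]

theorem select_rare_letters_py_spec : Claim_equal_select_rare_letters_py := by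
  intro lc n _hdom hpre
  unfold Spec_select_rare_letters_py select_rare_letters_py_alt
  by_cases hn : n ≤ 0
  · rw [pvPeel]
    simp [select_rare_letters_py, hn]
  · by_cases hlc : lc = []
    · subst hlc
      simp [select_rare_letters_py, PySem.List.sorted2, hn]
    · have hB : ¬ ((decide (n ≤ 0) || lc.isEmpty) = true) := by simp [hn, hlc]
      rw [if_neg hB]
      exact pv_main lc.length lc le_rfl hpre n
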